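-- pv_equiv track=rewrite | github.com/Umbral-Tension/python-jtools | src/jtools/jmath/jcombinatoric.py | orderings_by_index
-- ===== SOURCE A (Python) =====
-- def orderings_by_index(n, index_set=None):
--     """
--     return a list of all possible orderings of the INDICES in a hypothetical n-length list.
--
--     These indices may later be mapped to the values in an actual n-length list or other subscriptable object to produce the list
--     of all possible orderings of the items in that subscriptable.
--     """
--
--     if index_set is None:
--         index_set = list(range(n))
--
--     length = len(index_set)
--     # included for completeness, even though I shouldn't be asking for the orderings of a single item list.
--     if length == 1:
--         return [[0]]
--     # recursive base case is trivial case of all orderings of the last two indices of a list.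
--     elif length == 2:
--         return [[index_set[0], index_set[1]], [index_set[1], index_set[0]]]
--     else:
--         orderings = []
--         # Pick one element, set it at the first position. Combine it with all possible orderings of the remaining subset of elements.
--         for i in index_set:
--             subset = index_set.copy()
--             subset.remove(i)
--             orderings.extend([[i] + x for x in orderings_by_index(n, subset)])
--
--     return orderings
-- ===== SOURCE B (Python) =====
-- def orderings_by_index(n, index_set=None):
--     if index_set is None:
--         index_set = list(range(n))
--     m = len(index_set)
--     if m == 0:
--         return []
--     prefixes = [[]]
--     for _ in range(m):
--         prefixes = [p + [x] for p in prefixes for x in index_set if x not in p]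
--     return prefixes
-- ===== Notes on version B (the rewrite author's own statement) =====
-- stated objective: simpler
-- what changed: Replaces the hand-rolled recursion (with two hard-coded base cases and remove-by-value subsets) by a single iterative breadth-first loop that extends every prefix by each still-unused element, repeated len(index_set) times.
-- intended difference: On an explicit one-element index_set [v] with v != 0, A returns the hard-coded sentinel [[0]] ignoring the actual element, while B returns [[v]], the single ordering of that index set, which is the intended value. — e.g. on orderings_by_index(0, some [5]): A returns [[0]], B returns [[5]]
-- outside the precondition, e.g. on orderings_by_index(0, [1, 1]): A returns [[1, 1], [1, 1]], B returns []
import Mathlib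
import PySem

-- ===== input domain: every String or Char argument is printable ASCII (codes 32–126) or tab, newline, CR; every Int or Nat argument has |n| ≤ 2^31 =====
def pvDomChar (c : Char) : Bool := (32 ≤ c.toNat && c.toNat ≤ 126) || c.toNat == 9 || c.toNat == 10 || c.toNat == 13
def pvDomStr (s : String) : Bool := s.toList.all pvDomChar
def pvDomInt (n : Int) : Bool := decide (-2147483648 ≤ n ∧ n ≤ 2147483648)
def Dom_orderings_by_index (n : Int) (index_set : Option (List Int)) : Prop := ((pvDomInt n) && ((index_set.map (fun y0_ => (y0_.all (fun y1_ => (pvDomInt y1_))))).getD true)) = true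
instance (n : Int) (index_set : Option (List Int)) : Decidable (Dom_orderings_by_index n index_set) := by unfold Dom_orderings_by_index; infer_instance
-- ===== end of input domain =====

-- B replaces A's recursion by an iterative breadth-first prefix-extension loop (objective: simpler);
-- on a one-element index_set [v] with v ≠ 0 B returns [[v]] instead of A's hard-coded [[0]] (see D_ below).

-- ===== PORT A =====
-- fuel makes the recursion total; the subset strictly shrinks, so fuel = length + 1 is never exhausted.
def obiGo : Nat → Int → List Int → List (List Int)
  | 0, _, _ => []
  | fuel+1, n, idx =>
    if idx.length = 1 then [[0]]
    else if idx.length = 2 then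
      [[PySem.List.pyGetD idx 0 0, PySem.List.pyGetD idx 1 0],
       [PySem.List.pyGetD idx 1 0, PySem.List.pyGetD idx 0 0]]
    else
      idx.foldl (fun acc i =>
        acc ++ (match PySem.List.remove? idx i with
                | some subset => (obiGo fuel n subset).map (fun x => i :: x)
                | none => [])) []

def orderings_by_index (n : Int) (index_set : Option (List Int)) : List (List Int) :=
  let idx := match index_set with
    | none => PySem.List.pyRange 0 n 1
    | some l => l
  obiGo (idx.length + 1) n idx

-- ===== PORT B =====
-- one loop pass: extend every prefix by each element of idx not already used in it
def obiStep (idx : List Int) (prefixes : List (List Int)) : List (List Int) :=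
  prefixes.flatMap (fun p => (idx.filter (fun x => !(decide (x ∈ p)))).map (fun x => p ++ [x]))

def orderings_by_index_alt (n : Int) (index_set : Option (List Int)) : List (List Int) :=
  let idx := match index_set with
    | none => PySem.List.pyRange 0 n 1
    | some l => l
  let m := idx.length
  if m = 0 then []
  else (List.range m).foldl (fun acc _ => obiStep idx acc) [[]]

-- ===== PRECONDITION & SPEC =====
-- Pre_ excludes an explicit index_set with duplicate elements: the function enumerates orderings of
-- DISTINCT indices, and A's remove-by-first-occurrence recursion produces an accidental repeated/reordered
-- listing on duplicates that no caller would specify (B's unused-element filter drops them instead).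
def Pre_orderings_by_index (n : Int) (index_set : Option (List Int)) : Prop :=
  (index_set.getD []).Nodup

instance (n : Int) (index_set : Option (List Int)) : Decidable (Pre_orderings_by_index n index_set) := by
  unfold Pre_orderings_by_index; infer_instance

def pvWitness_orderings_by_index : Int × Option (List Int) := (3, none)

-- On an explicit one-element index_set [v] with v ≠ 0, A returns the hard-coded sentinel [[0]]
-- ignoring the actual element, while B returns [[v]], the single ordering of that set — the intended value.
def D_orderings_by_index (n : Int) (index_set : Option (List Int)) : Prop :=
  index_set ≠ none ∧ (index_set.getD []).length = 1 ∧ index_set.getD [] ≠ [0]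

instance (n : Int) (index_set : Option (List Int)) : Decidable (D_orderings_by_index n index_set) := by
  unfold D_orderings_by_index; infer_instance

def Spec_orderings_by_index (n : Int) (index_set : Option (List Int)) (out : List (List Int)) : Prop :=
  ¬ D_orderings_by_index n index_set → out = orderings_by_index_alt n index_set

instance (n : Int) (index_set : Option (List Int)) (out : List (List Int)) : Decidable (Spec_orderings_by_index n index_set out) := by
  unfold Spec_orderings_by_index; infer_instance

def pvDiffWitness_orderings_by_index : Int × Option (List Int) := (0, some [5])
def pvDiffWitnessOut_orderings_by_index : (List (List Int)) × (List (List Int)) := ([[0]], [[5]])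

-- ===== CLAIM (what is proved, stated in full; the proofs are below) =====
def Claim_unchanged_orderings_by_index : Prop := ∀ (n : Int) (index_set : Option (List Int)), Dom_orderings_by_index n index_set → Pre_orderings_by_index n index_set → Spec_orderings_by_index n index_set (orderings_by_index n index_set)
def Claim_changed_orderings_by_index : Prop := Dom_orderings_by_index (pvDiffWitness_orderings_by_index.1) (pvDiffWitness_orderings_by_index.2) ∧ Pre_orderings_by_index (pvDiffWitness_orderings_by_index.1) (pvDiffWitness_orderings_by_index.2) ∧ D_orderings_by_index (pvDiffWitness_orderings_by_index.1) (pvDiffWitness_orderings_by_index.2) ∧ orderings_by_index (pvDiffWitness_orderings_by_index.1) (pvDiffWitness_orderings_by_index.2) = pvDiffWitnessOut_orderings_by_index.1 ∧ orderings_by_index_alt (pvDiffWitness_orderings_by_index.1) (pvDiffWitness_orderings_by_index.2) = pvDiffWitnessOut_orderings_by_index.2 ∧ pvDiffWitnessOut_orderings_by_index.1 ≠ pvDiffWitnessOut_orderings_by_index.2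
def Claim_exact_orderings_by_index : Prop := ∀ (n : Int) (index_set : Option (List Int)), Dom_orderings_by_index n index_set → Pre_orderings_by_index n index_set → D_orderings_by_index n index_set → orderings_by_index n index_set ≠ orderings_by_index_alt n index_set

-- ===== LEMMAS AND PROOFS =====

-- reference enumeration: all k-element selections (in A's and B's shared order)
def sel : Nat → List Int → List (List Int)
  | 0, _ => [[]]
  | k+1, ys => ys.flatMap (fun x => (sel k (ys.erase x)).map (fun q => x :: q))

theorem obiStep_append (idx : List Int) (a b : List (List Int)) :
    obiStep idx (a ++ b) = obiStep idx a ++ obiStep idx b := by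
  simp [obiStep]

theorem foldl_const_iterate {α : Type} (f : α → α) (a : α) (m : Nat) :
    (List.range m).foldl (fun acc _ => f acc) a = f^[m] a := by
  induction m generalizing a with
  | zero => simp
  | succ k ih => simp [List.range_succ, ih, Function.iterate_succ_apply']

theorem iterate_step_append (idx : List Int) (k : Nat) (a b : List (List Int)) :
    (obiStep idx)^[k] (a ++ b) = (obiStep idx)^[k] a ++ (obiStep idx)^[k] b := by
  induction k generalizing a b with
  | zero => simp
  | succ m ih => simp [Function.iterate_succ_apply, obiStep_append, ih]

theorem iterate_step_nil (idx : List Int) (k : Nat) :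
    (obiStep idx)^[k] ([] : List (List Int)) = [] := by
  induction k with
  | zero => rfl
  | succ m ih => simp [Function.iterate_succ_apply, obiStep, ih]

theorem filter_not_mem_append (idx p : List Int) (x : Int) (hx : (idx.filter (fun y => !(decide (y ∈ p)))).Nodup) :
    idx.filter (fun y => !(decide (y ∈ p ++ [x]))) = (idx.filter (fun y => !(decide (y ∈ p)))).erase x := by
  rw [List.Nodup.erase_eq_filter hx, List.filter_filter]
  apply List.filter_congr
  intro y _
  by_cases h1 : y ∈ p <;> by_cases h2 : y = x <;> simp [h1, h2]

-- main B-side invariant: iterating from a single prefix enumerates sel of the unused elements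
theorem iterate_step_single (idx : List Int) (hn : idx.Nodup) (k : Nat) (p : List Int) :
    (obiStep idx)^[k] [p] = (sel k (idx.filter (fun y => !(decide (y ∈ p))))).map (fun q => p ++ q) := by
  induction k generalizing p with
  | zero => simp [sel]
  | succ m ih =>
    rw [Function.iterate_succ_apply]
    have hstep : obiStep idx [p] = (idx.filter (fun y => !(decide (y ∈ p)))).map (fun x => p ++ [x]) := by
      simp [obiStep]
    rw [hstep]
    have hnd : (idx.filter (fun y => !(decide (y ∈ p)))).Nodup := hn.filter _
    -- distribute the iterate over the list of extended prefixes
    have hexp : ∀ (l : List Int), l.Nodup → (∀ x ∈ l, x ∈ idx.filter (fun y => !(decide (y ∈ p)))) →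
        (obiStep idx)^[m] (l.map (fun x => p ++ [x]))
          = l.flatMap (fun x => (sel m ((idx.filter (fun y => !(decide (y ∈ p)))).erase x)).map (fun q => (p ++ [x]) ++ q)) := by
      intro l hl hsub
      induction l with
      | nil => simpa using iterate_step_nil idx m
      | cons a t iht =>
        have : (a :: t).map (fun x => p ++ [x]) = [p ++ [a]] ++ t.map (fun x => p ++ [x]) := by simp
        rw [this, iterate_step_append, ih, iht hl.of_cons (fun x hx => hsub x (List.mem_cons_of_mem a hx))]
        rw [filter_not_mem_append idx p a hnd]
        simp
    rw [hexp _ hnd (fun x hx => hx)]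
    simp only [sel, List.map_flatMap, List.map_map]
    congr 1
    funext x
    congr 1
    funext q
    simp [List.append_assoc]

-- B equals sel on nonempty input
theorem alt_eq_sel (idx : List Int) (hn : idx.Nodup) (hne : idx.length ≠ 0) (m : Nat) (hm : m = idx.length) :
    (List.range m).foldl (fun acc _ => obiStep idx acc) [[]] = sel idx.length idx := by
  rw [foldl_const_iterate, iterate_step_single idx hn]
  simp [hm]

-- sel on a two-element nodup list
theorem sel_two (a b : Int) (hab : a ≠ b) : sel 2 [a, b] = [[a, b], [b, a]] := by
  have h1 : ([a, b] : List Int).erase a = [b] := by simp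
  have h2 : ([a, b] : List Int).erase b = [a] := by
    simp [hab]
  simp [sel, h1, h2]

-- A-side: obiGo equals sel for nodup lists of length ≥ 2, given enough fuel
theorem obiGo_eq_sel (fuel : Nat) (n : Int) (idx : List Int) (hn : idx.Nodup)
    (hlen : 2 ≤ idx.length) (hf : idx.length ≤ fuel) :
    obiGo fuel n idx = sel idx.length idx := by
  induction fuel generalizing idx with
  | zero => omega
  | succ f ih =>
    by_cases h2 : idx.length = 2
    · obtain ⟨a, b, rfl⟩ := List.length_eq_two.mp h2
      have hab : a ≠ b := by simpa using hn
      simp [obiGo, PySem.List.pyGetD, PySem.List.pyIdx?, PySem.List.pyGet?, sel_two a b hab]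
    · have h1 : idx.length ≠ 1 := by omega
      have h3 : 3 ≤ idx.length := by omega
      rw [obiGo]
      rw [if_neg h1, if_neg h2]
      rw [PySem.List.foldl_congr_mem (g := fun acc i =>
        acc ++ ((sel (idx.length - 1) (idx.erase i)).map (fun x => i :: x)))]
      · rw [PySem.List.foldl_append_eq_flatMap]
        have hsel : idx.length = (idx.length - 1) + 1 := by omega
        rw [hsel]
        simp [sel]
      · intro acc i hi
        simp only [PySem.List.remove?_eq_some_erase idx i hi]
        have he : (idx.erase i).length = idx.length - 1 := List.length_erase_of_mem hi
        rw [ih (idx.erase i) (hn.erase i) (by omega) (by omega), he]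

theorem main_eq (n : Int) (idx : List Int) (hn : idx.Nodup) (hd : idx.length = 1 → idx = [0]) :
    obiGo (idx.length + 1) n idx = orderings_by_index_alt n (some idx) := by
  by_cases h0 : idx.length = 0
  · have : idx = [] := List.length_eq_zero_iff.mp h0
    subst this
    simp [obiGo, orderings_by_index_alt]
  · by_cases h1 : idx.length = 1
    · have := hd h1
      subst this
      simp [obiGo, orderings_by_index_alt, List.range_succ, obiStep]
    · have h2 : 2 ≤ idx.length := by omega
      rw [obiGo_eq_sel (idx.length + 1) n idx hn h2 (by omega)]
      unfold orderings_by_index_alt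
      simp only [if_neg h0]
      rw [alt_eq_sel idx hn h0 idx.length rfl]

-- ===== VERDICT (by name: the statement is the Claim_ definition above) =====
theorem orderings_by_index_spec : Claim_unchanged_orderings_by_index := by
  intro n index_set _ hpre hnd
  match index_set with
  | none =>
    show orderings_by_index n none = orderings_by_index_alt n none
    unfold orderings_by_index
    have hnodup : (PySem.List.pyRange 0 n 1).Nodup := PySem.List.nodup_pyRange_one 0 n
    have : orderings_by_index_alt n none = orderings_by_index_alt n (some (PySem.List.pyRange 0 n 1)) := by
      simp [orderings_by_index_alt]
    rw [this]
    exact main_eq n _ hnodup (by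
      intro h1
      match hzz : PySem.List.pyRange 0 n 1, h1 with
      | [a], _ =>
        have : a ∈ PySem.List.pyRange 0 n 1 := by rw [hzz]; simp
        have := (PySem.List.mem_pyRange_one).mp this
        have h01 : (0:Int) ∈ PySem.List.pyRange 0 n 1 := by
          rw [PySem.List.mem_pyRange_one]; omega
        rw [hzz] at h01
        simp at h01
        simp [h01])
  | some l =>
    show orderings_by_index n (some l) = orderings_by_index_alt n (some l)
    unfold orderings_by_index
    apply main_eq n l (by simpa [Pre_orderings_by_index] using hpre)
    intro h1
    by_contra hne0
    exact hnd ⟨by simp, by simpa using h1, by simpa using hne0⟩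

theorem orderings_by_index_changed : Claim_changed_orderings_by_index := by
  unfold Claim_changed_orderings_by_index; decide

theorem orderings_by_index_tight : Claim_exact_orderings_by_index := by
  intro n index_set _ _ hd
  obtain ⟨hnn, h1, hne⟩ := hd
  match index_set, hnn with
  | some l, _ =>
    simp only [Option.getD_some] at h1 hne
    obtain ⟨v, rfl⟩ := List.length_eq_one_iff.mp h1
    have hv : v ≠ 0 := by
      intro h; exact hne (by simp [h])
    simp [orderings_by_index, orderings_by_index_alt, obiGo, List.range_succ, obiStep, hv]
    omega
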